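-- pv_equiv track=rewrite | github.com/MikeDominic92/Predictive-Threat-Intelligence-Platform-for-Cloud-Vulnerabilities | src/functions/data_processing/normalizers/alienvault.py | map_alienvault_category
-- ===== SOURCE A (Python) =====
-- def map_alienvault_category(tags, indicator_type):
--     """Attempt to map AlienVault tags/type to a standard threat category."""
--     tags_lower = [tag.lower() for tag in tags]
--
--     if "malware" in tags_lower: return "malware"
--     if "ransomware" in tags_lower: return "malware"
--     if "phishing" in tags_lower: return "phishing"
--     if "c2" in tags_lower or "command and control" in tags_lower: return "c2"
--     if "exploit" in tags_lower: return "exploit_kit"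
--     if "apt" in tags_lower: return "apt"
--     if "scan" in tags_lower or "scanner" in tags_lower: return "scanner"
--     if "botnet" in tags_lower: return "botnet"
--     # Add more specific mappings based on observed tags
--
--     # Generic fallback based on type
--     if indicator_type in ["IPv4", "IPv6", "domain", "hostname", "URL"]:
--         return "suspicious_network_activity"
--     if indicator_type and indicator_type.startswith("FileHash"):
--         return "suspicious_file"
--
--     return "unknown"
-- ===== SOURCE B (Python) =====
-- _CAT = {
--     "malware": (0, "malware"),
--     "ransomware": (1, "malware"),
--     "phishing": (2, "phishing"),
--     "c2": (3, "c2"),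
--     "command and control": (3, "c2"),
--     "exploit": (4, "exploit_kit"),
--     "apt": (5, "apt"),
--     "scan": (6, "scanner"),
--     "scanner": (6, "scanner"),
--     "botnet": (7, "botnet"),
-- }
--
-- _NETWORK_TYPES = {"IPv4", "IPv6", "domain", "hostname", "URL"}
--
--
-- def map_alienvault_category(tags, indicator_type):
--     """Map AlienVault tags/type to a standard threat category (single pass)."""
--     best = None
--     for tag in tags:
--         hit = _CAT.get(tag.lower())
--         if hit is not None and (best is None or hit[0] < best[0]):
--             best = hit
--     if best is not None:
--         return best[1]
--     if indicator_type in _NETWORK_TYPES: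
--         return "suspicious_network_activity"
--     if indicator_type and indicator_type.startswith("FileHash"):
--         return "suspicious_file"
--     return "unknown"
-- ===== Notes on version B (the rewrite author's own statement) =====
-- stated objective: alternative
-- what changed: Replaces A's fixed ladder of ten membership tests over the lowered tag list by a single pass over the tags with a keyword->(priority, category) table, keeping the lowest-priority hit; the same indicator_type fallback applies when nothing matches.
import Mathlib
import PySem

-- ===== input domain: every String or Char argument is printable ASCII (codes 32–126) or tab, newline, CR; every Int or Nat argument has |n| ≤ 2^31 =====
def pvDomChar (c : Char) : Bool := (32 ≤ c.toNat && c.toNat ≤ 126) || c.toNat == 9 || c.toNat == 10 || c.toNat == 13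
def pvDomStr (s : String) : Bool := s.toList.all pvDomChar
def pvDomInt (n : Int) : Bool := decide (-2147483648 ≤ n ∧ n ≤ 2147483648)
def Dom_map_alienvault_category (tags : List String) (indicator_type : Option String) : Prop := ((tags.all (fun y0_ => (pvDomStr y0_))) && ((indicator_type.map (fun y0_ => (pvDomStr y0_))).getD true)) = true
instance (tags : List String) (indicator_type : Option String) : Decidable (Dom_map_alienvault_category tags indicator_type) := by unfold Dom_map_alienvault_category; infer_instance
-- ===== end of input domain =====

-- B replaces A's fixed ladder of membership tests by one pass over the tags with a
-- keyword→(priority, category) table, keeping the lowest-priority hit (objective: alternative).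

-- ===== PORT A =====
def map_alienvault_category (tags : List String) (indicator_type : Option String) : String :=
  let tags_lower := tags.map PySem.Str.lower
  if tags_lower.contains "malware" then "malware"
  else if tags_lower.contains "ransomware" then "malware"
  else if tags_lower.contains "phishing" then "phishing"
  else if tags_lower.contains "c2" || tags_lower.contains "command and control" then "c2"
  else if tags_lower.contains "exploit" then "exploit_kit"
  else if tags_lower.contains "apt" then "apt"
  else if tags_lower.contains "scan" || tags_lower.contains "scanner" then "scanner"
  else if tags_lower.contains "botnet" then "botnet"
  else if (match indicator_type with
           | some s => (["IPv4", "IPv6", "domain", "hostname", "URL"] : List String).contains s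
           | none => false) then "suspicious_network_activity"
  else if (match indicator_type with
           | some s => s != "" && PySem.Str.startswith s "FileHash"
           | none => false) then "suspicious_file"
  else "unknown"

-- ===== PORT B =====
def pvCatTable : PySem.Dict String (Nat × String) :=
  PySem.Dict.mk
    [("malware", (0, "malware")), ("ransomware", (1, "malware")),
     ("phishing", (2, "phishing")), ("c2", (3, "c2")),
     ("command and control", (3, "c2")), ("exploit", (4, "exploit_kit")),
     ("apt", (5, "apt")), ("scan", (6, "scanner")), ("scanner", (6, "scanner")),
     ("botnet", (7, "botnet"))]

def pvNetTypes : PySem.Set String :=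
  PySem.Set.ofList ["IPv4", "IPv6", "domain", "hostname", "URL"]

-- the loop body of Source B: hit = _CAT.get(tag.lower()); keep it if strictly better
def pvBStep (best : Option (Nat × String)) (tag : String) : Option (Nat × String) :=
  match PySem.Dict.get? pvCatTable (PySem.Str.lower tag) with
  | none => best
  | some hit =>
    match best with
    | none => some hit
    | some b => if hit.1 < b.1 then some hit else some b

def map_alienvault_category_alt (tags : List String) (indicator_type : Option String) : String :=
  match tags.foldl pvBStep none with
  | some b => b.2
  | none =>
    if (match indicator_type with
        | some s => pvNetTypes.contains s
        | none => false) then "suspicious_network_activity"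
    else if (match indicator_type with
             | some s => s != "" && PySem.Str.startswith s "FileHash"
             | none => false) then "suspicious_file"
    else "unknown"

-- ===== PRECONDITION & SPEC =====
def Spec_map_alienvault_category (tags : List String) (indicator_type : Option String) (out : String) : Prop := out = map_alienvault_category_alt tags indicator_type
instance (tags : List String) (indicator_type : Option String) (out : String) : Decidable (Spec_map_alienvault_category tags indicator_type out) := by unfold Spec_map_alienvault_category; infer_instance

-- ===== CLAIM (what is proved, stated in full; the proofs are below) =====
def Claim_equal_map_alienvault_category : Prop := ∀ (tags : List String) (indicator_type : Option String), Dom_map_alienvault_category tags indicator_type → Spec_map_alienvault_category tags indicator_type (map_alienvault_category tags indicator_type)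

-- ===== LEMMAS AND PROOFS =====

set_option maxHeartbeats 1000000

-- left-biased "keep the smaller rank" combiner; pvBStep b t = pvMerge b (lookup of t.lower)
def pvMerge (b o : Option (Nat × String)) : Option (Nat × String) :=
  match o with
  | none => b
  | some hit =>
    match b with
    | none => some hit
    | some p => if hit.1 < p.1 then some hit else some p

theorem pvMerge_none_left (o : Option (Nat × String)) : pvMerge none o = o := by
  cases o <;> rfl

theorem pvMerge_none_right (b : Option (Nat × String)) : pvMerge b none = b := by
  cases b <;> rfl

theorem pvMerge_some_some (p q : Nat × String) :
    pvMerge (some p) (some q) = if q.1 < p.1 then some q else some p := rfl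

theorem pvMerge_assoc (a b c : Option (Nat × String)) :
    pvMerge (pvMerge a b) c = pvMerge a (pvMerge b c) := by
  rcases a with _ | a <;> rcases b with _ | b <;> rcases c with _ | c <;>
    simp only [pvMerge_none_left, pvMerge_none_right, pvMerge_some_some] <;>
    (try split_ifs) <;>
    simp only [pvMerge_none_left, pvMerge_none_right, pvMerge_some_some] <;>
    (try split_ifs) <;>
    first | rfl | omega | (exfalso; omega)

-- what A's ladder computes, as a (priority, category) value
def pvABest (m : List String) : Option (Nat × String) :=
  if m.contains "malware" then some (0, "malware")
  else if m.contains "ransomware" then some (1, "malware")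
  else if m.contains "phishing" then some (2, "phishing")
  else if m.contains "c2" || m.contains "command and control" then some (3, "c2")
  else if m.contains "exploit" then some (4, "exploit_kit")
  else if m.contains "apt" then some (5, "apt")
  else if m.contains "scan" || m.contains "scanner" then some (6, "scanner")
  else if m.contains "botnet" then some (7, "botnet")
  else none

theorem pvCat_get_of_ne (x : String) (h1 : x ≠ "malware") (h2 : x ≠ "ransomware")
    (h3 : x ≠ "phishing") (h4 : x ≠ "c2") (h5 : x ≠ "command and control")
    (h6 : x ≠ "exploit") (h7 : x ≠ "apt") (h8 : x ≠ "scan") (h9 : x ≠ "scanner")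
    (h10 : x ≠ "botnet") : pvCatTable.get? x = none := by
  simp [pvCatTable, PySem.Dict.get?_mk_cons, Ne.symm h1, Ne.symm h2, Ne.symm h3,
    Ne.symm h4, Ne.symm h5, Ne.symm h6, Ne.symm h7, Ne.symm h8, Ne.symm h9, Ne.symm h10]
  rfl

theorem pvABest_cons (x : String) (m : List String) :
    pvABest (x :: m) = pvMerge (pvCatTable.get? x) (pvABest m) := by
  by_cases h1 : x = "malware"
  · subst h1
    have hc : pvCatTable.get? "malware" = some (0, "malware") := rfl
    rw [hc]; simp [pvABest, List.contains_cons]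
    split_ifs <;> simp [pvMerge]
  by_cases h2 : x = "ransomware"
  · subst h2
    have hc : pvCatTable.get? "ransomware" = some (1, "malware") := rfl
    rw [hc]; simp [pvABest, List.contains_cons]
    split_ifs <;> simp [pvMerge]
  by_cases h3 : x = "phishing"
  · subst h3
    have hc : pvCatTable.get? "phishing" = some (2, "phishing") := rfl
    rw [hc]; simp [pvABest, List.contains_cons]
    split_ifs <;> simp [pvMerge]
  by_cases h4 : x = "c2"
  · subst h4
    have hc : pvCatTable.get? "c2" = some (3, "c2") := rfl
    rw [hc]; simp [pvABest, List.contains_cons]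
    split_ifs <;> simp [pvMerge]
  by_cases h5 : x = "command and control"
  · subst h5
    have hc : pvCatTable.get? "command and control" = some (3, "c2") := rfl
    rw [hc]; simp [pvABest, List.contains_cons]
    split_ifs <;> simp [pvMerge]
  by_cases h6 : x = "exploit"
  · subst h6
    have hc : pvCatTable.get? "exploit" = some (4, "exploit_kit") := rfl
    rw [hc]; simp [pvABest, List.contains_cons]
    split_ifs <;> simp [pvMerge]
  by_cases h7 : x = "apt"
  · subst h7
    have hc : pvCatTable.get? "apt" = some (5, "apt") := rfl
    rw [hc]; simp [pvABest, List.contains_cons]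
    split_ifs <;> simp [pvMerge]
  by_cases h8 : x = "scan"
  · subst h8
    have hc : pvCatTable.get? "scan" = some (6, "scanner") := rfl
    rw [hc]; simp [pvABest, List.contains_cons]
    split_ifs <;> simp [pvMerge]
  by_cases h9 : x = "scanner"
  · subst h9
    have hc : pvCatTable.get? "scanner" = some (6, "scanner") := rfl
    rw [hc]; simp [pvABest, List.contains_cons]
    split_ifs <;> simp [pvMerge]
  by_cases h10 : x = "botnet"
  · subst h10
    have hc : pvCatTable.get? "botnet" = some (7, "botnet") := rfl
    rw [hc]; simp [pvABest, List.contains_cons]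
    split_ifs <;> simp [pvMerge]
  · rw [pvCat_get_of_ne x h1 h2 h3 h4 h5 h6 h7 h8 h9 h10]
    simp [pvABest, pvMerge_none_left, List.contains_cons, Ne.symm h1, Ne.symm h2, Ne.symm h3,
      Ne.symm h4, Ne.symm h5, Ne.symm h6, Ne.symm h7, Ne.symm h8, Ne.symm h9, Ne.symm h10]

theorem pvFold_eq (m : List String) : ∀ b : Option (Nat × String),
    m.foldl (fun b s => pvMerge b (pvCatTable.get? s)) b = pvMerge b (pvABest m) := by
  induction m with
  | nil => intro b; cases b <;> rfl
  | cons x m ih =>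
    intro b
    simp only [List.foldl_cons, ih, pvABest_cons, pvMerge_assoc]

theorem pvFoldB_eq (tags : List String) :
    tags.foldl pvBStep none = pvABest (tags.map PySem.Str.lower) := by
  have hstep : pvBStep = fun b t => pvMerge b (pvCatTable.get? (PySem.Str.lower t)) := rfl
  rw [hstep, ← List.foldl_map (f := PySem.Str.lower)
      (g := fun b s => pvMerge b (pvCatTable.get? s)), pvFold_eq, pvMerge_none_left]

theorem pvNetTypes_eq : pvNetTypes = ["IPv4", "IPv6", "domain", "hostname", "URL"] := by decide

-- ===== VERDICT (by name: the statement is the Claim_ definition above) =====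
theorem map_alienvault_category_spec : Claim_equal_map_alienvault_category := by
  intro tags indicator_type _
  unfold Spec_map_alienvault_category map_alienvault_category map_alienvault_category_alt
  rw [pvFoldB_eq, pvNetTypes_eq]
  simp only [pvABest, PySem.Set.contains_eq_listContains]
  split_ifs <;> rfl
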